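-- pv_equiv track=rewrite | github.com/DaeWon9/PS | 백준/Gold/1941. 소문난 칠공주/소문난 칠공주.py | is_linked
-- ===== SOURCE A (Python) =====
-- from collections import deque
--
-- direction_x = [0, 0, 1, -1]
--
-- direction_y = [1, -1, 0, 0]
--
-- def is_movable(dr, dc):
--     return (0 <= dr < 5 and 0 <= dc < 5)
--
-- def is_linked(pos_set):
--     board = [[0 for _ in range(5)] for _ in range(5)]
--     visited = [[False for _ in range(5)] for _ in range(5)]
--     visit_count = 0
--
--     for r, c in pos_set:
--         board[r][c] = 1
--
--     queue = deque([(r, c)])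
--     visited[r][c] = True
--
--     while queue:
--         r, c = queue.popleft()
--
--         for idx in range(4):
--             dr = r + direction_y[idx]
--             dc = c + direction_x[idx]
--
--             if (is_movable(dr, dc) and not visited[dr][dc] and board[dr][dc] == 1):
--                 queue.append((dr, dc))
--                 visited[dr][dc] = True
--                 visit_count += 1
--
--     if (visit_count == 6):
--         return 1
--     return 0
-- ===== SOURCE B (Python) =====
-- def is_linked(pos_set):
--     board = [[False for _ in range(5)] for _ in range(5)]
--     for r, c in pos_set:
--         board[r][c] = True
--     cells = [(r2, c2) for r2 in range(5) for c2 in range(5) if board[r2][c2]]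
--     # incremental connected components: scan the marked cells once,
--     # merging the component sets each cell's neighbours already belong to
--     comps = []
--     for cell in cells:
--         neighbors = [(cell[0] + 1, cell[1]), (cell[0] - 1, cell[1]),
--                      (cell[0], cell[1] + 1), (cell[0], cell[1] - 1)]
--         touching = [comp for comp in comps if any(nb in comp for nb in neighbors)]
--         rest = [comp for comp in comps if not any(nb in comp for nb in neighbors)]
--         merged = {cell}
--         for comp in touching:
--             merged |= comp
--         comps = rest + [merged]
--     size = 0
--     for comp in comps:
--         if (r, c) in comp:
--             size = len(comp)
--     return 1 if size == 7 else 0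
-- ===== Notes on version B (the rewrite author's own statement) =====
-- stated objective: alternative
-- what changed: Replaces the deque-BFS traversal from the start cell with incremental connected components: B scans the marked board cells once, merging the component sets each cell's neighbours already belong to, and answers whether the component holding the last position has size 7.
-- outside the precondition, e.g. on is_linked({(0, 1), (1, 2), (0, 0), (1, 1), (0, 2), (1, 0), (-1, 2)}): A returns 1, B returns 0
import Mathlib
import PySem

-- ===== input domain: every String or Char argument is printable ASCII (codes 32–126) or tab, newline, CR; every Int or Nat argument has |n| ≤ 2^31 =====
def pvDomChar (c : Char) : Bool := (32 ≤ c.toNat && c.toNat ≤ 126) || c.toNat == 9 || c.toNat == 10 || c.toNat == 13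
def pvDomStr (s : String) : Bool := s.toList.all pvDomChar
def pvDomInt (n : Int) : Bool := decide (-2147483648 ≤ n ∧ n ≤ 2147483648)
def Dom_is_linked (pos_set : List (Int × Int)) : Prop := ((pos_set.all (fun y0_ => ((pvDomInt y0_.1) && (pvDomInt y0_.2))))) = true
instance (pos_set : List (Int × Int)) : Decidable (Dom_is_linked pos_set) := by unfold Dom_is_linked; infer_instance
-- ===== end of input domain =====

-- B replaces the deque-BFS from a start cell with incremental connected components
-- (union-by-merging over the marked board cells); alternative algorithm, similar cost.

-- ===== PORT A =====
def direction_x : List Int := [0, 0, 1, -1]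
def direction_y : List Int := [1, -1, 0, 0]

def is_movable (dr dc : Int) : Bool := decide (0 ≤ dr ∧ dr < 5) && decide (0 ≤ dc ∧ dc < 5)

-- m[r][c] = v, Python index semantics; total form (no-op where Python raises IndexError)
def mset {α : Type} (m : List (List α)) (r c : Int) (v : α) : List (List α) :=
  ((PySem.List.pyGet? m r).map (fun row =>
    PySem.List.pySetD m r (PySem.List.pySetD row c v))).getD m

-- m[r][c], Python index semantics; total form with default d where Python raises
def mget {α : Type} (m : List (List α)) (r c : Int) (d : α) : α :=
  ((PySem.List.pyGet? m r).bind (fun row => PySem.List.pyGet? row c)).getD d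

-- the 'while queue' loop of A (fuel is a guard only; 1000 is never reached: ≤ 26 iterations happen)
def bfsA (board : List (List Int)) : Nat → List (Int × Int) → List (List Bool) → Int → Int
  | 0, _, _, cnt => cnt
  | _ + 1, [], _, cnt => cnt
  | fuel + 1, (r, c) :: rest, visited, cnt =>
    let st := (List.range 4).foldl (fun (st : List (Int × Int) × List (List Bool) × Int) idx =>
      let dr := r + direction_y.getD idx 0
      let dc := c + direction_x.getD idx 0
      if is_movable dr dc && !(mget st.2.1 dr dc false) && (mget board dr dc 0 == 1)
      then (st.1 ++ [(dr, dc)], mset st.2.1 dr dc true, st.2.2 + 1)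
      else st) (rest, visited, cnt)
    bfsA board fuel st.1 st.2.1 st.2.2

def is_linked (pos_set : List (Int × Int)) : Int :=
  let board0 : List (List Int) := List.replicate 5 (List.replicate 5 0)
  let visited0 : List (List Bool) := List.replicate 5 (List.replicate 5 false)
  let board := pos_set.foldl (fun b p => mset b p.1 p.2 1) board0
  match pos_set.getLast? with
  | none => 0   -- Python: NameError here (empty pos_set); excluded by Pre_
  | some (r, c) =>
    let visit_count := bfsA board 1000 [(r, c)] (mset visited0 r c true) 0
    if visit_count == 6 then 1 else 0

-- ===== PORT B =====
def nbrs (p : Int × Int) : List (Int × Int) :=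
  [(p.1 + 1, p.2), (p.1 - 1, p.2), (p.1, p.2 + 1), (p.1, p.2 - 1)]

def touches (comp : PySem.Set (Int × Int)) (ns : List (Int × Int)) : Bool :=
  ns.any (fun nb => PySem.Set.contains comp nb)

-- one iteration of B's loop: merge the components touching `cell` with {cell}
def mergeStep (comps : List (PySem.Set (Int × Int))) (cell : Int × Int) :
    List (PySem.Set (Int × Int)) :=
  let ns := nbrs cell
  let touching := comps.filter (fun comp => touches comp ns)
  let rest := comps.filter (fun comp => !(touches comp ns))
  let merged := touching.foldl (fun m comp => PySem.Set.union m comp)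
    (PySem.Set.add PySem.Set.empty cell)
  rest ++ [merged]

def is_linked_alt (pos_set : List (Int × Int)) : Int :=
  let board := pos_set.foldl (fun b p => mset b p.1 p.2 true)
    (List.replicate 5 (List.replicate 5 false))
  -- '(r, c)' below is the loop variable of 'for r, c in pos_set' after the loop; on empty
  -- input Python never reads it (comps is empty, size stays 0 and 0 is returned)
  match pos_set.getLast? with
  | none => 0
  | some start =>
    let cells := (List.range 5).flatMap (fun r2 =>
      ((List.range 5).map (fun c2 => (Int.ofNat r2, Int.ofNat c2))).filter
        (fun p => mget board p.1 p.2 false))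
    let comps := cells.foldl mergeStep []
    let size := comps.foldl (fun sz comp =>
      if PySem.Set.contains comp start then PySem.Set.len comp else sz) (0 : Int)
    if size == 7 then 1 else 0

-- ===== PRECONDITION & SPEC =====
-- Pre_ excludes: empty input and coordinates outside [-5,5), where A raises (NameError /
-- IndexError); and inputs with 7 or more distinct positions some of which use a negative
-- coordinate — there a position may be read as a wrapped board cell (Python indexing) or as
-- a distinct off-board position, both defensible, and A's and B's readings differ.
def Pre_is_linked (pos_set : List (Int × Int)) : Prop :=
  pos_set ≠ [] ∧ (∀ p ∈ pos_set, -5 ≤ p.1 ∧ p.1 < 5 ∧ -5 ≤ p.2 ∧ p.2 < 5) ∧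
    ((∀ p ∈ pos_set, 0 ≤ p.1 ∧ 0 ≤ p.2) ∨ (PySem.Set.ofList pos_set).length ≤ 6)
instance (pos_set : List (Int × Int)) : Decidable (Pre_is_linked pos_set) := by
  unfold Pre_is_linked; infer_instance

def pvWitness_is_linked : List (Int × Int) :=
  [(0, 0), (0, 1), (0, 2), (0, 3), (0, 4), (1, 4), (2, 4)]

def Spec_is_linked (pos_set : List (Int × Int)) (out : Int) : Prop := out = is_linked_alt pos_set
instance (pos_set : List (Int × Int)) (out : Int) : Decidable (Spec_is_linked pos_set out) := by
  unfold Spec_is_linked; infer_instance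

-- ===== CLAIM (what is proved, stated in full; the proofs are below) =====
def Claim_equal_is_linked : Prop := ∀ (pos_set : List (Int × Int)), Dom_is_linked pos_set → Pre_is_linked pos_set → Spec_is_linked pos_set (is_linked pos_set)

-- ===== LEMMAS AND PROOFS =====

def InGrid (p : Int × Int) : Prop := 0 ≤ p.1 ∧ p.1 < 5 ∧ 0 ≤ p.2 ∧ p.2 < 5

def gridL : List (Int × Int) :=
  (List.range 5).flatMap (fun i => (List.range 5).map (fun j => (Int.ofNat i, Int.ofNat j)))

def gridF : Finset (Int × Int) := gridL.toFinset

theorem mem_gridL (q : Int × Int) : q ∈ gridL ↔ InGrid q := by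
  constructor
  · intro h
    obtain ⟨i, hi, h2⟩ := List.mem_flatMap.mp h
    obtain ⟨j, hj, h3⟩ := List.mem_map.mp h2
    rw [List.mem_range] at hi hj
    obtain ⟨x, y⟩ := q
    injection h3 with e1 e2
    simp only [Int.ofNat_eq_natCast] at e1 e2
    refine ⟨?_, ?_, ?_, ?_⟩ <;> omega
  · intro h
    obtain ⟨x, y⟩ := q
    obtain ⟨h1, h2, h3, h4⟩ := h
    refine List.mem_flatMap.mpr ⟨x.toNat, List.mem_range.mpr (by omega), ?_⟩
    refine List.mem_map.mpr ⟨y.toNat, List.mem_range.mpr (by omega), ?_⟩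
    rw [Prod.mk.injEq]
    constructor <;> simp only [Int.ofNat_eq_natCast] <;> omega

theorem mem_gridF (p : Int × Int) : p ∈ gridF ↔ InGrid p := by
  rw [gridF, List.mem_toFinset]
  exact mem_gridL p

theorem card_gridF : gridF.card = 25 := by decide

theorem ite_cond_true {α : Sort _} {b : Bool} (h : b = true) (x y : α) :
    (if b = true then x else y) = x := by simp [h]

theorem ite_cond_false {α : Sort _} {b : Bool} (h : b = false) (x y : α) :
    (if b = true then x else y) = y := by simp [h]

-- adjacency / reachability within a cell list
def Step (cells : List (Int × Int)) (a b : Int × Int) : Prop := b ∈ nbrs a ∧ b ∈ cells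

def Reach (cells : List (Int × Int)) (s x : Int × Int) : Prop :=
  Relation.ReflTransGen (Step cells) s x

theorem rtg_mem_of_closed {α : Type} {r : α → α → Prop} {V : α → Prop} {s x : α}
    (hs : V s) (hcl : ∀ a, V a → ∀ b, r a b → V b) (h : Relation.ReflTransGen r s x) : V x := by
  induction h with
  | refl => exact hs
  | tail _ hstep ih => exact hcl _ ih _ hstep

theorem nbrs_nodup (p : Int × Int) : (nbrs p).Nodup := by
  simp [nbrs, Prod.ext_iff]; omega

theorem mem_nbrs_symm {a b : Int × Int} : b ∈ nbrs a ↔ a ∈ nbrs b := by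
  simp [nbrs, Prod.ext_iff]; omega

-- ----- matrices -----
def Shape {α : Type} (m : List (List α)) : Prop := m.length = 5 ∧ ∀ row ∈ m, row.length = 5

theorem shape_replicate {α : Type} (v : α) : Shape (List.replicate 5 (List.replicate 5 v)) := by
  constructor
  · simp
  · intro row hrow; simp_all [List.eq_of_mem_replicate hrow]

theorem mget_eq {α : Type} {m : List (List α)} {r c : Int} (d : α)
    (hr0 : 0 ≤ r) (hc0 : 0 ≤ c) :
    mget m r c d = ((m[r.toNat]?.getD []).getD c.toNat d) := by
  unfold mget
  rw [PySem.List.pyGet?_of_nonneg _ hr0]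
  cases h : m[r.toNat]? with
  | none => simp [List.getD]
  | some row =>
    simp [PySem.List.pyGet?_of_nonneg _ hc0, List.getD_eq_getElem?_getD]

theorem mset_eq {α : Type} {m : List (List α)} {r c : Int} (v : α)
    (hr0 : 0 ≤ r) (hr : r.toNat < m.length) (hc0 : 0 ≤ c) :
    mset m r c v = m.set r.toNat ((m[r.toNat]'hr).set c.toNat v) := by
  unfold mset
  rw [PySem.List.pyGet?_of_nonneg _ hr0, List.getElem?_eq_getElem hr]
  simp only [Option.map_some, Option.getD_some]
  rw [PySem.List.pySetD_of_nonneg _ _ hc0, PySem.List.pySetD_of_nonneg _ _ hr0]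

theorem shape_mset {α : Type} {m : List (List α)} (hm : Shape m) {p : Int × Int}
    (hp : InGrid p) (v : α) : Shape (mset m p.1 p.2 v) := by
  obtain ⟨hlen, hrows⟩ := hm
  obtain ⟨hp1, hp2, hp3, hp4⟩ := hp
  have hr : p.1.toNat < m.length := by omega
  rw [mset_eq v hp1 hr hp3]
  refine ⟨by simp [hlen], ?_⟩
  intro row hrow
  rcases List.mem_or_eq_of_mem_set hrow with h | h
  · exact hrows _ h
  · subst h; simp [hrows _ (List.getElem_mem _)]

theorem mget_mset_self {α : Type} {m : List (List α)} (hm : Shape m) {p : Int × Int}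
    (hp : InGrid p) (v : α) (d : α) : mget (mset m p.1 p.2 v) p.1 p.2 d = v := by
  obtain ⟨hlen, hrows⟩ := hm
  obtain ⟨hp1, hp2, hp3, hp4⟩ := hp
  have hr : p.1.toNat < m.length := by omega
  have hc : p.2.toNat < (m[p.1.toNat]'hr).length := by
    rw [hrows _ (List.getElem_mem _)]; omega
  rw [mset_eq v hp1 hr hp3, mget_eq d hp1 hp3]
  rw [List.getElem?_set_self', List.getElem?_eq_getElem hr]
  show ((m[p.1.toNat]'hr).set p.2.toNat v).getD p.2.toNat d = v
  rw [List.getD_eq_getElem?_getD, List.getElem?_set_self', List.getElem?_eq_getElem hc]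
  rfl

theorem mget_mset_ne {α : Type} {m : List (List α)} (hm : Shape m) {p q : Int × Int}
    (hp : InGrid p) (hq : InGrid q) (hne : p ≠ q) (v : α) (d : α) :
    mget (mset m p.1 p.2 v) q.1 q.2 d = mget m q.1 q.2 d := by
  obtain ⟨hlen, hrows⟩ := hm
  obtain ⟨hp1, hp2, hp3, hp4⟩ := hp
  obtain ⟨hq1, hq2, hq3, hq4⟩ := hq
  have hr : p.1.toNat < m.length := by omega
  rw [mset_eq v hp1 hr hp3, mget_eq d hq1 hq3, mget_eq d hq1 hq3]
  by_cases hrow : p.1.toNat = q.1.toNat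
  · have hpq2 : p.2.toNat ≠ q.2.toNat := by
      have h1 : p.1 = q.1 := by omega
      have : p.2 ≠ q.2 := by
        intro h2; exact hne (Prod.ext_iff.mpr ⟨h1, h2⟩)
      omega
    rw [← hrow, List.getElem?_set_self', List.getElem?_eq_getElem hr]
    show ((m[p.1.toNat]'hr).set p.2.toNat v).getD q.2.toNat d
        = ((some (m[p.1.toNat]'hr)).getD []).getD q.2.toNat d
    rw [List.getD_eq_getElem?_getD, List.getElem?_set_ne hpq2]
    rfl
  · rw [List.getElem?_set_ne hrow]

-- ----- visited-set abstraction -----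
def visF (m : List (List Bool)) : Finset (Int × Int) :=
  gridF.filter (fun p => mget m p.1 p.2 false = true)

theorem mem_visF {m : List (List Bool)} {p : Int × Int} :
    p ∈ visF m ↔ InGrid p ∧ mget m p.1 p.2 false = true := by
  simp [visF, Finset.mem_filter, mem_gridF]

theorem visF_card_le (m : List (List Bool)) : (visF m).card ≤ 25 := by
  rw [← card_gridF]; exact Finset.card_le_card (Finset.filter_subset _ _)

theorem visF_mset_true {m : List (List Bool)} (hm : Shape m) {p : Int × Int} (hp : InGrid p) :
    visF (mset m p.1 p.2 true) = insert p (visF m) := by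
  ext q
  by_cases hq : InGrid q
  · by_cases hpq : p = q
    · subst hpq
      simp [mem_visF, hq, mget_mset_self hm hp, Finset.mem_insert]
    · have hqp : q ≠ p := fun h => hpq h.symm
      rw [mem_visF, mget_mset_ne hm hp hq hpq, Finset.mem_insert, ← mem_visF]
      simp [hqp]
  · have h1 : q ∉ visF (mset m p.1 p.2 true) := fun h => hq (mem_visF.mp h).1
    have h2 : q ∉ visF m := fun h => hq (mem_visF.mp h).1
    have h3 : q ≠ p := fun h => hq (h ▸ hp)
    simp [h1, h2, h3]

theorem visF_init : visF (List.replicate 5 (List.replicate 5 false)) = ∅ := by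
  ext q
  simp only [Finset.notMem_empty, iff_false, mem_visF, not_and]
  intro hq
  obtain ⟨h1, h2, h3, h4⟩ := hq
  rw [mget_eq false h1 h3]
  have h5 : q.1.toNat < 5 := by omega
  rw [List.getElem?_replicate, if_pos h5]
  simp only [Option.getD_some]
  rw [List.getD_eq_getElem?_getD, List.getElem?_replicate]
  by_cases h6 : q.2.toNat < 5 <;> simp [h6]

-- ----- the board -----
def BoardOK (board : List (List Int)) (S : Int × Int → Prop) : Prop :=
  Shape board ∧ ∀ p : Int × Int, InGrid p → (mget board p.1 p.2 0 = 1 ↔ S p)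

theorem boardOK_congr {board : List (List Int)} {S S' : Int × Int → Prop}
    (h : BoardOK board S) (hss : ∀ p, S p ↔ S' p) : BoardOK board S' :=
  ⟨h.1, fun p hp => (h.2 p hp).trans (hss p)⟩

theorem board_loop (l : List (Int × Int)) (hl : ∀ p ∈ l, InGrid p) :
    ∀ (b : List (List Int)) (S : Int × Int → Prop), BoardOK b S →
      BoardOK (l.foldl (fun b p => mset b p.1 p.2 1) b) (fun p => S p ∨ p ∈ l) := by
  induction l with
  | nil => intro b S h; simpa using h
  | cons q l ih =>
    intro b S hBS
    obtain ⟨hsh, hb⟩ := hBS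
    have hq : InGrid q := hl q (by simp)
    have hstep : BoardOK (mset b q.1 q.2 1) (fun p => S p ∨ p = q) := by
      refine ⟨shape_mset ⟨hsh.1, hsh.2⟩ hq 1, ?_⟩
      intro p hp
      by_cases hpq : q = p
      · subst hpq; rw [mget_mset_self ⟨hsh.1, hsh.2⟩ hq]; simp
      · have hqp : p ≠ q := fun h => hpq h.symm
        rw [mget_mset_ne ⟨hsh.1, hsh.2⟩ hq hp hpq, hb p hp]
        simp [hqp]
    have := ih (fun p hp => hl p (by simp [hp])) (mset b q.1 q.2 1) _ hstep
    refine boardOK_congr this ?_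
    intro p; simp; tauto

theorem board_built (pos_set : List (Int × Int)) (hg : ∀ p ∈ pos_set, InGrid p) :
    BoardOK (pos_set.foldl (fun b p => mset b p.1 p.2 1)
      (List.replicate 5 (List.replicate 5 0))) (fun p => p ∈ pos_set) := by
  have h0 : BoardOK (List.replicate 5 (List.replicate 5 0)) (fun _ => False) := by
    refine ⟨shape_replicate 0, ?_⟩
    intro p hp
    obtain ⟨h1, h2, h3, h4⟩ := hp
    rw [mget_eq 0 h1 h3]
    have h5 : p.1.toNat < 5 := by omega
    rw [List.getElem?_replicate, if_pos h5]
    simp only [Option.getD_some]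
    rw [List.getD_eq_getElem?_getD, List.getElem?_replicate]
    by_cases h6 : p.2.toNat < 5 <;> simp [h6]
  have := board_loop pos_set hg _ _ h0
  exact boardOK_congr this (by simp)

-- ----- B's board (Bool marks) -----
def BoardOKB (board : List (List Bool)) (S : Int × Int → Prop) : Prop :=
  Shape board ∧ ∀ p : Int × Int, InGrid p → (mget board p.1 p.2 false = true ↔ S p)

theorem boardOKB_congr {board : List (List Bool)} {S S' : Int × Int → Prop}
    (h : BoardOKB board S) (hss : ∀ p, S p ↔ S' p) : BoardOKB board S' :=
  ⟨h.1, fun p hp => (h.2 p hp).trans (hss p)⟩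

theorem board_loopB (l : List (Int × Int)) (hl : ∀ p ∈ l, InGrid p) :
    ∀ (b : List (List Bool)) (S : Int × Int → Prop), BoardOKB b S →
      BoardOKB (l.foldl (fun b p => mset b p.1 p.2 true) b) (fun p => S p ∨ p ∈ l) := by
  induction l with
  | nil => intro b S h; simpa using h
  | cons q l ih =>
    intro b S hBS
    obtain ⟨hsh, hb⟩ := hBS
    have hq : InGrid q := hl q (by simp)
    have hstep : BoardOKB (mset b q.1 q.2 true) (fun p => S p ∨ p = q) := by
      refine ⟨shape_mset ⟨hsh.1, hsh.2⟩ hq true, ?_⟩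
      intro p hp
      by_cases hpq : q = p
      · subst hpq; rw [mget_mset_self ⟨hsh.1, hsh.2⟩ hq]; simp
      · have hqp : p ≠ q := fun h => hpq h.symm
        rw [mget_mset_ne ⟨hsh.1, hsh.2⟩ hq hp hpq, hb p hp]
        simp [hqp]
    have := ih (fun p hp => hl p (by simp [hp])) (mset b q.1 q.2 true) _ hstep
    refine boardOKB_congr this ?_
    intro p; simp; tauto

theorem board_builtB (l : List (Int × Int)) (hg : ∀ p ∈ l, InGrid p) :
    BoardOKB (l.foldl (fun b p => mset b p.1 p.2 true)
      (List.replicate 5 (List.replicate 5 false))) (fun p => p ∈ l) := by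
  have h0 : BoardOKB (List.replicate 5 (List.replicate 5 false)) (fun _ => False) := by
    refine ⟨shape_replicate false, ?_⟩
    intro p hp
    obtain ⟨h1, h2, h3, h4⟩ := hp
    rw [mget_eq false h1 h3]
    have h5 : p.1.toNat < 5 := by omega
    rw [List.getElem?_replicate, if_pos h5]
    simp only [Option.getD_some]
    rw [List.getD_eq_getElem?_getD, List.getElem?_replicate]
    by_cases h6 : p.2.toNat < 5 <;> simp [h6]
  have := board_loopB l hg _ _ h0
  exact boardOKB_congr this (by simp)

-- the marked-cell list B scans: membership and distinctness
theorem cellsB_eq (board : List (List Bool)) :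
    (List.range 5).flatMap (fun r2 =>
      ((List.range 5).map (fun c2 => (Int.ofNat r2, Int.ofNat c2))).filter
        (fun p => mget board p.1 p.2 false))
      = gridL.filter (fun p => mget board p.1 p.2 false) := by
  rw [gridL, List.filter_flatMap]

theorem mem_cellsB {board : List (List Bool)} {x : Int × Int} :
    x ∈ gridL.filter (fun p => mget board p.1 p.2 false)
      ↔ InGrid x ∧ mget board x.1 x.2 false = true := by
  rw [List.mem_filter, mem_gridL]

theorem nodup_gridL : gridL.Nodup := by decide

theorem nodup_cellsB (board : List (List Bool)) :
    (gridL.filter (fun p => mget board p.1 p.2 false)).Nodup :=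
  nodup_gridL.filter _

-- ----- A's BFS -----
theorem cond_eq {cells : List (Int × Int)} {board : List (List Int)} {vis : List (List Bool)}
    (hb : BoardOK board (fun p => p ∈ cells)) (hgrid : ∀ p ∈ cells, InGrid p)
    (_hsh : Shape vis) (b : Int × Int) :
    (is_movable b.1 b.2 && !(mget vis b.1 b.2 false) && (mget board b.1 b.2 0 == 1))
      = decide (b ∈ cells ∧ b ∉ visF vis) := by
  by_cases hig : InGrid b
  · have h1 : is_movable b.1 b.2 = true := by
      unfold is_movable; obtain ⟨a1, a2, a3, a4⟩ := hig; simp; omega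
    have h2 : (mget board b.1 b.2 0 == 1) = decide (b ∈ cells) := by
      obtain ⟨hsh', hb2⟩ := hb
      by_cases hc : b ∈ cells
      · simp [hc, (hb2 b hig).mpr hc]
      · simp only [hc, decide_false]
        rw [beq_eq_false_iff_ne]
        intro h; exact hc ((hb2 b hig).mp h)
    have h3 : (!(mget vis b.1 b.2 false)) = decide (b ∉ visF vis) := by
      by_cases hv : b ∈ visF vis
      · simp [hv, (mem_visF.mp hv).2]
      · have hx : mget vis b.1 b.2 false ≠ true := fun h => hv (mem_visF.mpr ⟨hig, h⟩)
        simp [hv, hx]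
    rw [h1, h2, h3]
    by_cases hc : b ∈ cells <;> by_cases hv : b ∈ visF vis <;> simp [hc, hv]
  · have h1 : is_movable b.1 b.2 = false := by
      unfold is_movable InGrid at *; simp; omega
    have h2 : ¬ (b ∈ cells ∧ b ∉ visF vis) := fun h => hig (hgrid b h.1)
    simp [h1, h2]

theorem pushLoop {cells : List (Int × Int)} {board : List (List Int)}
    (hb : BoardOK board (fun p => p ∈ cells)) (hgrid : ∀ p ∈ cells, InGrid p) :
    ∀ (ts : List (Int × Int)), ts.Nodup →
      ∀ (q : List (Int × Int)) (vis : List (List Bool)) (cnt : Int), Shape vis →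
      let out := ts.foldl (fun (st : List (Int × Int) × List (List Bool) × Int) b =>
        if is_movable b.1 b.2 && !(mget st.2.1 b.1 b.2 false) && (mget board b.1 b.2 0 == 1)
        then (st.1 ++ [b], mset st.2.1 b.1 b.2 true, st.2.2 + 1) else st) (q, vis, cnt)
      let new := ts.filter (fun b => decide (b ∈ cells ∧ b ∉ visF vis))
      Shape out.2.1 ∧ visF out.2.1 = visF vis ∪ new.toFinset ∧
        out.1 = q ++ new ∧ out.2.2 = cnt + new.length := by
  intro ts
  induction ts with
  | nil => intro _ q vis cnt h; simpa using h
  | cons b ts ih =>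
    intro hnd q vis cnt hsh
    have hbts : b ∉ ts := (List.nodup_cons.mp hnd).1
    have hnd' : ts.Nodup := (List.nodup_cons.mp hnd).2
    simp only [List.foldl_cons, List.filter_cons]
    rw [cond_eq hb hgrid hsh b]
    by_cases hcond : b ∈ cells ∧ b ∉ visF vis
    · rw [decide_eq_true hcond]
      rw [ite_cond_true rfl, ite_cond_true rfl]
      have hig : InGrid b := hgrid b hcond.1
      have hsh' : Shape (mset vis b.1 b.2 true) := shape_mset hsh hig true
      have hvf : visF (mset vis b.1 b.2 true) = insert b (visF vis) := visF_mset_true hsh hig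
      obtain ⟨o1, o2, o3, o4⟩ := ih hnd' (q ++ [b]) (mset vis b.1 b.2 true) (cnt + 1) hsh'
      have hfc : ts.filter (fun x => decide (x ∈ cells ∧ x ∉ visF (mset vis b.1 b.2 true)))
          = ts.filter (fun x => decide (x ∈ cells ∧ x ∉ visF vis)) := by
        apply List.filter_congr
        intro x hx
        have hxb : x ≠ b := fun h => hbts (h ▸ hx)
        simp [hvf, hxb]
      rw [hfc] at o2 o3 o4
      refine ⟨o1, ?_, ?_, ?_⟩
      · rw [o2, hvf]
        ext y
        simp only [Finset.mem_insert, Finset.mem_union, List.mem_toFinset, List.mem_cons]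
        tauto
      · rw [o3]; simp
      · rw [o4]; simp only [List.length_cons]; push_cast; ring
    · rw [decide_eq_false hcond]
      rw [ite_cond_false rfl, ite_cond_false rfl]
      exact ih hnd' q vis cnt hsh

theorem stepFold_eq (board : List (List Int)) (r c : Int)
    (init : List (Int × Int) × List (List Bool) × Int) :
    (List.range 4).foldl (fun (st : List (Int × Int) × List (List Bool) × Int) idx =>
      let dr := r + direction_y.getD idx 0
      let dc := c + direction_x.getD idx 0
      if is_movable dr dc && !(mget st.2.1 dr dc false) && (mget board dr dc 0 == 1)
      then (st.1 ++ [(dr, dc)], mset st.2.1 dr dc true, st.2.2 + 1) else st) init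
    = (nbrs (r, c)).foldl (fun (st : List (Int × Int) × List (List Bool) × Int) b =>
      if is_movable b.1 b.2 && !(mget st.2.1 b.1 b.2 false) && (mget board b.1 b.2 0 == 1)
      then (st.1 ++ [b], mset st.2.1 b.1 b.2 true, st.2.2 + 1) else st) init := by
  have hmap : (List.range 4).map (fun idx =>
      ((r + direction_y.getD idx 0, c + direction_x.getD idx 0) : Int × Int)) = nbrs (r, c) := by
    show [((r + 1, c + 0) : Int × Int), (r + -1, c + 0), (r + 0, c + 1), (r + 0, c + -1)]
        = nbrs (r, c)
    rw [show nbrs (r, c) = [(r + 1, c), (r - 1, c), (r, c + 1), (r, c - 1)] from rfl]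
    rw [List.cons.injEq, List.cons.injEq, List.cons.injEq, List.cons.injEq,
        Prod.mk.injEq, Prod.mk.injEq, Prod.mk.injEq, Prod.mk.injEq]
    refine ⟨⟨by omega, by omega⟩, ⟨by omega, by omega⟩, ⟨by omega, by omega⟩,
      ⟨by omega, by omega⟩, rfl⟩
  rw [← hmap, List.foldl_map]

theorem bfsA_run {cells : List (Int × Int)} {board : List (List Int)} {s : Int × Int}
    (hb : BoardOK board (fun p => p ∈ cells)) (hgrid : ∀ p ∈ cells, InGrid p) :
    ∀ (fuel : Nat) (q : List (Int × Int)) (vis : List (List Bool)) (cnt : Int),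
      Shape vis →
      (∀ p ∈ q, p ∈ visF vis) →
      s ∈ visF vis →
      (∀ p ∈ visF vis, Reach cells s p) →
      (∀ p ∈ visF vis, p ∉ q → ∀ b, Step cells p b → b ∈ visF vis) →
      26 * (25 - (visF vis).card) + q.length ≤ fuel →
      ∃ W : Finset (Int × Int),
        bfsA board fuel q vis cnt = cnt + ((W.card : Int) - ((visF vis).card : Int)) ∧
        s ∈ W ∧ (∀ p ∈ W, Reach cells s p) ∧ (∀ a ∈ W, ∀ b, Step cells a b → b ∈ W) := by
  intro fuel
  induction fuel with
  | zero =>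
    intro q vis cnt hsh hq hs hreach hcl hm
    have hq0 : q = [] := by
      cases q with
      | nil => rfl
      | cons a l => exfalso; simp at hm
    subst hq0
    refine ⟨visF vis, by simp [bfsA], hs, hreach, ?_⟩
    intro a ha b hb'
    exact hcl a ha (by simp) b hb'
  | succ fuel ih =>
    intro q vis cnt hsh hq hs hreach hcl hm
    cases q with
    | nil =>
      refine ⟨visF vis, by simp [bfsA], hs, hreach, ?_⟩
      intro a ha b hb'
      exact hcl a ha (by simp) b hb'
    | cons hd rest =>
      obtain ⟨r, c⟩ := hd
      have hunf : bfsA board (fuel + 1) ((r, c) :: rest) vis cnt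
          = bfsA board fuel
              ((nbrs (r, c)).foldl (fun (st : List (Int × Int) × List (List Bool) × Int) b =>
                if is_movable b.1 b.2 && !(mget st.2.1 b.1 b.2 false) && (mget board b.1 b.2 0 == 1)
                then (st.1 ++ [b], mset st.2.1 b.1 b.2 true, st.2.2 + 1) else st) (rest, vis, cnt)).1
              ((nbrs (r, c)).foldl (fun (st : List (Int × Int) × List (List Bool) × Int) b =>
                if is_movable b.1 b.2 && !(mget st.2.1 b.1 b.2 false) && (mget board b.1 b.2 0 == 1)
                then (st.1 ++ [b], mset st.2.1 b.1 b.2 true, st.2.2 + 1) else st) (rest, vis, cnt)).2.1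
              ((nbrs (r, c)).foldl (fun (st : List (Int × Int) × List (List Bool) × Int) b =>
                if is_movable b.1 b.2 && !(mget st.2.1 b.1 b.2 false) && (mget board b.1 b.2 0 == 1)
                then (st.1 ++ [b], mset st.2.1 b.1 b.2 true, st.2.2 + 1) else st) (rest, vis, cnt)).2.2 := by
        rw [bfsA, stepFold_eq]
      rw [hunf]
      obtain ⟨o1, o2, o3, o4⟩ := pushLoop hb hgrid (nbrs (r, c)) (nbrs_nodup _) rest vis cnt hsh
      rw [o3, o4]
      set new := (nbrs (r, c)).filter (fun b => decide (b ∈ cells ∧ b ∉ visF vis)) with hnewdef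
      have hnew_nodup : new.Nodup := (nbrs_nodup _).filter _
      have hnew_spec : ∀ x ∈ new, x ∈ nbrs (r, c) ∧ x ∈ cells ∧ x ∉ visF vis := by
        intro x hx
        have h1 := List.mem_of_mem_filter hx
        have h2 := List.of_mem_filter hx
        simp at h2
        exact ⟨h1, h2.1, h2.2⟩
      have hrc_mem : (r, c) ∈ visF vis := hq _ (by simp)
      have hdisj : Disjoint (visF vis) new.toFinset := by
        rw [Finset.disjoint_right]
        intro x hx
        exact (hnew_spec x (List.mem_toFinset.mp hx)).2.2
      have hVcard : (visF vis ∪ new.toFinset).card = (visF vis).card + new.length := by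
        rw [Finset.card_union_of_disjoint hdisj, List.toFinset_card_of_nodup hnew_nodup]
      obtain ⟨W, hW1, hW2, hW3, hW4⟩ :=
        ih (rest ++ new) _ (cnt + new.length) o1
          (by
            rw [o2]
            intro p hp
            rcases List.mem_append.mp hp with h | h
            · exact Finset.mem_union_left _ (hq p (by simp [h]))
            · exact Finset.mem_union_right _ (List.mem_toFinset.mpr h))
          (by rw [o2]; exact Finset.mem_union_left _ hs)
          (by
            rw [o2]
            intro p hp
            rcases Finset.mem_union.mp hp with h | h
            · exact hreach p h
            · obtain ⟨hnb, hc, _⟩ := hnew_spec p (List.mem_toFinset.mp h)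
              exact Relation.ReflTransGen.tail (hreach _ hrc_mem) ⟨hnb, hc⟩)
          (by
            rw [o2]
            intro p hp hpq b hstep
            rcases Finset.mem_union.mp hp with h | h
            · by_cases hprc : p = (r, c)
              · subst hprc
                by_cases hbv : b ∈ visF vis
                · exact Finset.mem_union_left _ hbv
                · refine Finset.mem_union_right _ (List.mem_toFinset.mpr ?_)
                  exact List.mem_filter.mpr ⟨hstep.1, by simp [hstep.2, hbv]⟩
              · have hpq' : p ∉ (r, c) :: rest := by
                  intro hmem
                  rcases List.mem_cons.mp hmem with h' | h'
                  · exact hprc h'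
                  · exact hpq (List.mem_append.mpr (Or.inl h'))
                exact Finset.mem_union_left _ (hcl p h hpq' b hstep)
            · exact absurd (List.mem_append.mpr (Or.inr (List.mem_toFinset.mp h))) hpq)
          (by
            rw [o2, hVcard]
            have hle : (visF vis ∪ new.toFinset).card ≤ 25 := by
              rw [← o2]; exact visF_card_le _
            rw [hVcard] at hle
            simp only [List.length_append, List.length_cons] at hm ⊢
            omega)
      refine ⟨W, ?_, hW2, hW3, hW4⟩
      rw [hW1, o2, hVcard]
      push_cast
      ring

-- ----- B's component merging -----
def StepIn (P : List (Int × Int)) (a b : Int × Int) : Prop :=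
  b ∈ nbrs a ∧ a ∈ P ∧ b ∈ P

def ConnIn (P : List (Int × Int)) (x y : Int × Int) : Prop :=
  Relation.ReflTransGen (StepIn P) x y

theorem stepIn_symm {P : List (Int × Int)} {a b : Int × Int} (h : StepIn P a b) : StepIn P b a :=
  ⟨mem_nbrs_symm.mp h.1, h.2.2, h.2.1⟩

theorem connIn_symm {P : List (Int × Int)} {x y : Int × Int} (h : ConnIn P x y) : ConnIn P y x :=
  Relation.ReflTransGen.symmetric (fun _ _ hs => stepIn_symm hs) h

theorem connIn_congr {P Q : List (Int × Int)} (hPQ : ∀ z, z ∈ P ↔ z ∈ Q) {x y : Int × Int} :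
    ConnIn P x y ↔ ConnIn Q x y := by
  constructor
  · exact Relation.ReflTransGen.mono (fun a b ⟨h1, h2, h3⟩ =>
      ⟨h1, (hPQ a).mp h2, (hPQ b).mp h3⟩)
  · exact Relation.ReflTransGen.mono (fun a b ⟨h1, h2, h3⟩ =>
      ⟨h1, (hPQ a).mpr h2, (hPQ b).mpr h3⟩)

theorem connIn_mono_cons {P : List (Int × Int)} {cell x y : Int × Int}
    (h : ConnIn P x y) : ConnIn (cell :: P) x y :=
  Relation.ReflTransGen.mono (fun a b ⟨h1, h2, h3⟩ => ⟨h1, by simp [h2], by simp [h3]⟩) h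

-- the loop invariant: comps partitions the processed cells into their connected components
def CompInv (P : List (Int × Int)) (comps : List (PySem.Set (Int × Int))) : Prop :=
  (∀ c ∈ comps, c.Nodup) ∧
  (∀ x : Int × Int, (∃ c ∈ comps, x ∈ c) ↔ x ∈ P) ∧
  (∀ c ∈ comps, ∀ d ∈ comps, ∀ x : Int × Int, x ∈ c → x ∈ d → c = d) ∧
  (∀ c ∈ comps, ∀ x ∈ c, ∀ y : Int × Int, y ∈ c ↔ ConnIn P x y)

theorem compInv_congr {P Q : List (Int × Int)} {comps : List (PySem.Set (Int × Int))}
    (hPQ : ∀ z, z ∈ P ↔ z ∈ Q) (h : CompInv P comps) : CompInv Q comps := by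
  obtain ⟨h1, h2, h3, h4⟩ := h
  refine ⟨h1, fun x => (h2 x).trans (hPQ x), h3, ?_⟩
  intro c hc x hx y
  rw [h4 c hc x hx y]
  exact connIn_congr hPQ

theorem touches_iff (comp : PySem.Set (Int × Int)) (ns : List (Int × Int)) :
    touches comp ns = true ↔ ∃ nb ∈ ns, nb ∈ comp := by
  simp [touches, List.any_eq_true]

theorem merged_fold (l : List (PySem.Set (Int × Int))) :
    ∀ (init : PySem.Set (Int × Int)), init.Nodup →
      (l.foldl (fun m comp => PySem.Set.union m comp) init).Nodup ∧
      ∀ x, x ∈ l.foldl (fun m comp => PySem.Set.union m comp) init ↔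
        x ∈ init ∨ ∃ c ∈ l, x ∈ c := by
  induction l with
  | nil => intro init hnd; simp [hnd]
  | cons c l ih =>
    intro init hnd
    simp only [List.foldl_cons]
    obtain ⟨ihnd, ihmem⟩ := ih (PySem.Set.union init c) (PySem.Set.nodup_union _ _ hnd)
    refine ⟨ihnd, ?_⟩
    intro x
    rw [ihmem x, PySem.Set.mem_union]
    constructor
    · rintro ((h | h) | ⟨d, hd, h⟩)
      · exact Or.inl h
      · exact Or.inr ⟨c, by simp, h⟩
      · exact Or.inr ⟨d, by simp [hd], h⟩
    · rintro (h | ⟨d, hd, h⟩)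
      · exact Or.inl (Or.inl h)
      · rcases List.mem_cons.mp hd with h' | h'
        · subst h'; exact Or.inl (Or.inr h)
        · exact Or.inr ⟨d, h', h⟩

theorem compInv_mergeStep {P : List (Int × Int)} {comps : List (PySem.Set (Int × Int))}
    {cell : Int × Int} (hInv : CompInv P comps) (hcell : cell ∉ P) :
    CompInv (cell :: P) (mergeStep comps cell) := by
  obtain ⟨hnd, hcov, hdisj, hconn⟩ := hInv
  have hPsub : ∀ c ∈ comps, ∀ x ∈ c, x ∈ P := by
    intro c hc x hx
    exact (hcov x).mp ⟨c, hc, hx⟩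
  have hclosed : ∀ c ∈ comps, ∀ a ∈ c, ∀ b, StepIn P a b → b ∈ c := by
    intro c hc a ha b hstep
    exact (hconn c hc a ha b).mpr (Relation.ReflTransGen.single hstep)
  unfold mergeStep
  simp only []
  set ns := nbrs cell with hns
  set touching := comps.filter (fun comp => touches comp ns) with htg
  set rest := comps.filter (fun comp => !(touches comp ns)) with hrst
  have hadd : PySem.Set.add PySem.Set.empty cell = [cell] := rfl
  obtain ⟨hmnd, hmmem'⟩ := merged_fold touching (PySem.Set.add PySem.Set.empty cell)
    (by rw [hadd]; exact List.nodup_singleton cell)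
  set merged := touching.foldl (fun m comp => PySem.Set.union m comp)
    (PySem.Set.add PySem.Set.empty cell) with hmg
  have hmmem : ∀ x, x ∈ merged ↔ x = cell ∨ ∃ c ∈ touching, x ∈ c := by
    intro x
    rw [hmmem' x, hadd]
    simp
  have hT : ∀ c ∈ touching, c ∈ comps ∧ touches c ns = true := by
    intro c hc
    exact ⟨List.mem_of_mem_filter hc, (List.mem_filter.mp hc).2⟩
  have hR : ∀ c ∈ rest, c ∈ comps ∧ touches c ns = false := by
    intro c hc
    refine ⟨List.mem_of_mem_filter hc, ?_⟩
    have := (List.mem_filter.mp hc).2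
    simpa using this
  have hTmem : ∀ c ∈ comps, touches c ns = true → c ∈ touching := by
    intro c hc ht
    exact List.mem_filter.mpr ⟨hc, ht⟩
  have hRmem : ∀ c ∈ comps, touches c ns = false → c ∈ rest := by
    intro c hc ht
    exact List.mem_filter.mpr ⟨hc, by simp [ht]⟩
  -- merged is connected to cell, and closed under StepIn (cell :: P)
  have hconnCell : ∀ z ∈ merged, ConnIn (cell :: P) cell z := by
    intro z hz
    rcases (hmmem z).mp hz with h | ⟨t, ht, hzt⟩
    · subst h; exact Relation.ReflTransGen.refl
    · obtain ⟨htc, htt⟩ := hT t ht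
      obtain ⟨nb, hnbns, hnbt⟩ := (touches_iff t ns).mp htt
      have hstep : StepIn (cell :: P) cell nb :=
        ⟨hnbns, by simp, by simp [hPsub t htc nb hnbt]⟩
      have hcz : ConnIn P nb z := (hconn t htc nb hnbt z).mp hzt
      exact Relation.ReflTransGen.trans (Relation.ReflTransGen.single hstep)
        (connIn_mono_cons hcz)
  have hmclosed : ∀ a ∈ merged, ∀ b, StepIn (cell :: P) a b → b ∈ merged := by
    intro a ha b ⟨hnb, _, hbP'⟩
    rcases List.mem_cons.mp hbP' with hbc | hbP
    · exact (hmmem b).mpr (Or.inl hbc)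
    · obtain ⟨c0, hc0, hbc0⟩ := (hcov b).mpr hbP
      rcases (hmmem a).mp ha with hac | ⟨t, ht, hat⟩
      · subst hac
        have : touches c0 ns = true := (touches_iff c0 ns).mpr ⟨b, hnb, hbc0⟩
        exact (hmmem b).mpr (Or.inr ⟨c0, hTmem c0 hc0 this, hbc0⟩)
      · obtain ⟨htc, _⟩ := hT t ht
        have haP : a ∈ P := hPsub t htc a hat
        have : b ∈ t := hclosed t htc a hat b ⟨hnb, haP, hbP⟩
        exact (hmmem b).mpr (Or.inr ⟨t, ht, this⟩)
  have hrclosed : ∀ c ∈ rest, ∀ a ∈ c, ∀ b, StepIn (cell :: P) a b → b ∈ c := by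
    intro c hc a ha b ⟨hnb, _, hbP'⟩
    obtain ⟨hcc, hcf⟩ := hR c hc
    rcases List.mem_cons.mp hbP' with hbc | hbP
    · exfalso
      subst hbc
      have : touches c ns = true :=
        (touches_iff c ns).mpr ⟨a, mem_nbrs_symm.mp hnb, ha⟩
      rw [hcf] at this
      exact absurd this (by simp)
    · exact hclosed c hcc a ha b ⟨hnb, hPsub c hcc a ha, hbP⟩
  refine ⟨?_, ?_, ?_, ?_⟩
  · -- nodup
    intro c hc
    rcases List.mem_append.mp hc with h | h
    · exact hnd c (hR c h).1
    · rw [List.mem_singleton.mp h]; exact hmnd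
  · -- coverage
    intro x
    constructor
    · rintro ⟨c, hc, hxc⟩
      rcases List.mem_append.mp hc with h | h
      · exact List.mem_cons.mpr (Or.inr (hPsub c (hR c h).1 x hxc))
      · rw [List.mem_singleton.mp h] at hxc
        rcases (hmmem x).mp hxc with h' | ⟨t, ht, hxt⟩
        · simp [h']
        · exact List.mem_cons.mpr (Or.inr (hPsub t (hT t ht).1 x hxt))
    · intro hx
      rcases List.mem_cons.mp hx with h | h
      · exact ⟨merged, List.mem_append.mpr (Or.inr (by simp)), (hmmem x).mpr (Or.inl h)⟩
      · obtain ⟨c, hc, hxc⟩ := (hcov x).mpr h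
        cases hcase : touches c ns with
        | true => exact ⟨merged, List.mem_append.mpr (Or.inr (by simp)),
            (hmmem x).mpr (Or.inr ⟨c, hTmem c hc hcase, hxc⟩)⟩
        | false => exact ⟨c, List.mem_append.mpr (Or.inl (hRmem c hc hcase)), hxc⟩
  · -- disjointness
    intro c hc d hd x hxc hxd
    rcases List.mem_append.mp hc with h1 | h1 <;> rcases List.mem_append.mp hd with h2 | h2
    · exact hdisj c (hR c h1).1 d (hR d h2).1 x hxc hxd
    · exfalso
      rw [List.mem_singleton.mp h2] at hxd
      obtain ⟨hcc, hcf⟩ := hR c h1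
      rcases (hmmem x).mp hxd with h' | ⟨t, ht, hxt⟩
      · subst h'; exact hcell (hPsub c hcc x hxc)
      · obtain ⟨htc, htt⟩ := hT t ht
        have := hdisj c hcc t htc x hxc hxt
        rw [this, htt] at hcf
        exact absurd hcf (by simp)
    · exfalso
      rw [List.mem_singleton.mp h1] at hxc
      obtain ⟨hdc, hdf⟩ := hR d h2
      rcases (hmmem x).mp hxc with h' | ⟨t, ht, hxt⟩
      · subst h'; exact hcell (hPsub d hdc x hxd)
      · obtain ⟨htc, htt⟩ := hT t ht
        have := hdisj d hdc t htc x hxd hxt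
        rw [this, htt] at hdf
        exact absurd hdf (by simp)
    · rw [List.mem_singleton.mp h1, List.mem_singleton.mp h2]
  · -- connectivity characterisation
    intro c hc x hx y
    rcases List.mem_append.mp hc with h | h
    · constructor
      · intro hy
        exact connIn_mono_cons ((hconn c (hR c h).1 x hx y).mp hy)
      · intro hconn'
        exact rtg_mem_of_closed (V := (· ∈ c)) hx (fun a ha b hs => hrclosed c h a ha b hs) hconn'
    · rw [List.mem_singleton.mp h] at hx ⊢
      constructor
      · intro hy
        exact Relation.ReflTransGen.trans (connIn_symm (hconnCell x hx)) (hconnCell y hy)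
      · intro hconn'
        exact rtg_mem_of_closed (V := (· ∈ merged)) hx (fun a ha b hs => hmclosed a ha b hs) hconn'

theorem compInv_fold : ∀ (l P : List (Int × Int)) (comps : List (PySem.Set (Int × Int))),
    CompInv P comps → (∀ c ∈ l, c ∉ P) → l.Nodup →
    CompInv (l ++ P) (l.foldl mergeStep comps) := by
  intro l
  induction l with
  | nil => intro P comps h _ _; simpa using h
  | cons cell l ih =>
    intro P comps hInv hfresh hnd
    have h1 : CompInv (cell :: P) (mergeStep comps cell) :=
      compInv_mergeStep hInv (hfresh cell (by simp))
    have h2 := ih (cell :: P) (mergeStep comps cell) h1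
      (by
        intro c hc hmem
        rcases List.mem_cons.mp hmem with h | h
        · exact (List.nodup_cons.mp hnd).1 (h ▸ hc)
        · exact hfresh c (by simp [hc]) h)
      (List.nodup_cons.mp hnd).2
    refine compInv_congr ?_ h2
    intro z
    simp only [List.mem_append, List.mem_cons]
    tauto

theorem reach_to_connIn {cells : List (Int × Int)} {s y : Int × Int}
    (hs : s ∈ cells) (h : Reach cells s y) : y ∈ cells ∧ ConnIn cells s y := by
  induction h with
  | refl => exact ⟨hs, Relation.ReflTransGen.refl⟩
  | tail _ hstep ih => exact ⟨hstep.2, ih.2.tail ⟨hstep.1, ih.1, hstep.2⟩⟩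

theorem size_fold_none (start : Int × Int) :
    ∀ (l : List (PySem.Set (Int × Int))) (acc : Int), (∀ c ∈ l, start ∉ c) →
      l.foldl (fun sz comp =>
        if PySem.Set.contains comp start then PySem.Set.len comp else sz) acc = acc := by
  intro l
  induction l with
  | nil => intro acc _; rfl
  | cons c l ih =>
    intro acc hnone
    simp only [List.foldl_cons]
    have : PySem.Set.contains c start = false := by
      cases h : PySem.Set.contains c start
      · rfl
      · exact absurd ((PySem.Set.contains_iff _ _).mp h) (hnone c (by simp))
    rw [ite_cond_false this]
    exact ih acc (fun d hd => hnone d (by simp [hd]))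

theorem size_fold (start : Int × Int) :
    ∀ (comps : List (PySem.Set (Int × Int))) (acc : Int) (c0 : PySem.Set (Int × Int)),
      c0 ∈ comps → start ∈ c0 → (∀ c ∈ comps, start ∈ c → c = c0) →
      comps.foldl (fun sz comp =>
        if PySem.Set.contains comp start then PySem.Set.len comp else sz) acc
        = PySem.Set.len c0 := by
  intro comps
  induction comps with
  | nil => intro acc c0 h; simp at h
  | cons h t ih =>
    intro acc c0 hc0 hstart huniq
    simp only [List.foldl_cons]
    by_cases hsh : start ∈ h
    · have hh : h = c0 := huniq h (by simp) hsh
      rw [ite_cond_true ((PySem.Set.contains_iff _ _).mpr hsh)]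
      by_cases hex : ∃ c ∈ t, start ∈ c
      · obtain ⟨c, hct, hsc⟩ := hex
        have heq : c = c0 := huniq c (by simp [hct]) hsc
        exact ih (PySem.Set.len h) c0 (heq ▸ hct) hstart
          (fun d hd hsd => huniq d (by simp [hd]) hsd)
      · rw [size_fold_none start t (PySem.Set.len h)
          (fun c hc hsc => hex ⟨c, hc, hsc⟩), hh]
    · rw [ite_cond_false (by
        cases hcase : PySem.Set.contains h start
        · rfl
        · exact absurd ((PySem.Set.contains_iff _ _).mp hcase) hsh)]
      have hc0t : c0 ∈ t := by
        rcases List.mem_cons.mp hc0 with h' | h'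
        · exact absurd (h' ▸ hstart) hsh
        · exact h'
      exact ih acc c0 hc0t hstart (fun d hd hsd => huniq d (by simp [hd]) hsd)

-- ----- glue -----
theorem beq_cond (n : Nat) : ((0 : Int) + ((n : Int) - 1) == 6) = ((n : Int) == 7) := by
  by_cases h : n = 7
  · subst h; rfl
  · have h1 : ((0 : Int) + ((n : Int) - 1) == 6) = false := by
      rw [beq_eq_false_iff_ne]; omega
    have h2 : (((n : Int)) == 7) = false := by
      rw [beq_eq_false_iff_ne]; omega
    rw [h1, h2]

theorem agree_nonneg (pos_set : List (Int × Int)) (hne : pos_set ≠ [])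
    (hgrid : ∀ p ∈ pos_set, InGrid p) :
    is_linked pos_set = is_linked_alt pos_set := by
  obtain ⟨s, hlast⟩ : ∃ s, pos_set.getLast? = some s := by
    cases h : pos_set.getLast? with
    | some s => exact ⟨s, rfl⟩
    | none => exact absurd (List.getLast?_eq_none_iff.mp h) hne
  have hsmem : s ∈ pos_set := List.mem_of_getLast? hlast
  have hsg : InGrid s := hgrid s hsmem
  obtain ⟨r, c⟩ := s
  unfold is_linked is_linked_alt
  rw [hlast]
  simp only []
  -- A side
  have hb : BoardOK (pos_set.foldl (fun b p => mset b p.1 p.2 1)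
      (List.replicate 5 (List.replicate 5 0))) (fun p => p ∈ pos_set) :=
    board_built pos_set hgrid
  have hsh1 : Shape (mset (List.replicate 5 (List.replicate 5 false)) r c true) :=
    shape_mset (shape_replicate false) hsg true
  have hv1 : visF (mset (List.replicate 5 (List.replicate 5 false)) r c true)
      = {((r, c) : Int × Int)} := by
    rw [show mset (List.replicate 5 (List.replicate 5 false)) r c true
          = mset (List.replicate 5 (List.replicate 5 false)) ((r, c) : Int × Int).1
              ((r, c) : Int × Int).2 true from rfl,
        visF_mset_true (shape_replicate false) hsg, visF_init]
    rfl
  obtain ⟨W, hW1, hW2, hW3, hW4⟩ :=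
    bfsA_run (s := (r, c)) hb hgrid 1000 [(r, c)]
      (mset (List.replicate 5 (List.replicate 5 false)) r c true) 0 hsh1
      (by intro p hp; rw [hv1]; simpa using hp)
      (by rw [hv1]; simp)
      (by
        intro p hp
        rw [hv1] at hp
        have : p = (r, c) := by simpa using hp
        subst this
        exact Relation.ReflTransGen.refl)
      (by
        intro p hp hpq b hstep
        rw [hv1] at hp
        have : p = (r, c) := by simpa using hp
        subst this
        exact absurd (by simp) hpq)
      (by rw [hv1]; simp)
  rw [hW1, hv1]
  -- B side: the merge-components invariant over the marked grid cells
  rw [cellsB_eq]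
  set board := pos_set.foldl (fun b p => mset b p.1 p.2 true)
    (List.replicate 5 (List.replicate 5 false)) with hboarddef
  have hbB : BoardOKB board (fun p => p ∈ pos_set) := board_builtB pos_set hgrid
  set cells := gridL.filter (fun p => mget board p.1 p.2 false) with hcellsdef
  have hmemB : ∀ x, x ∈ cells ↔ x ∈ pos_set := by
    intro x
    rw [hcellsdef, mem_cellsB]
    constructor
    · rintro ⟨hg, hm⟩
      exact (hbB.2 x hg).mp hm
    · intro hx
      exact ⟨hgrid x hx, (hbB.2 x (hgrid x hx)).mpr hx⟩
  have hcellsnd : cells.Nodup := nodup_cellsB board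
  have hInv0 : CompInv ([] : List (Int × Int)) ([] : List (PySem.Set (Int × Int))) := by
    refine ⟨by simp, by simp, by simp, by simp⟩
  have hInv1 := compInv_fold cells [] [] hInv0 (by simp) hcellsnd
  have hInv : CompInv cells (cells.foldl mergeStep []) := by
    refine compInv_congr ?_ hInv1
    intro z; simp
  obtain ⟨hnd, hcov, hdisj, hconn⟩ := hInv
  set comps := cells.foldl mergeStep [] with hcompsdef
  have hscells : ((r, c) : Int × Int) ∈ cells := (hmemB _).mpr hsmem
  obtain ⟨c0, hc0, hstart⟩ := (hcov ((r, c) : Int × Int)).mpr hscells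
  have huniq : ∀ d ∈ comps, ((r, c) : Int × Int) ∈ d → d = c0 := by
    intro d hd hsd
    exact hdisj d hd c0 hc0 ((r, c) : Int × Int) hsd hstart
  have hchar : ∀ y, y ∈ c0 ↔ ConnIn cells ((r, c) : Int × Int) y :=
    hconn c0 hc0 ((r, c) : Int × Int) hstart
  -- W equals c0
  have hconn_to_reach : ∀ y, ConnIn cells ((r, c) : Int × Int) y → Reach pos_set ((r, c)) y := by
    intro y hy
    exact Relation.ReflTransGen.mono (fun a b ⟨h1, _, h3⟩ => ⟨h1, (hmemB b).mp h3⟩) hy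
  have hreach_to_conn : ∀ y, Reach pos_set ((r, c)) y → ConnIn cells ((r, c) : Int × Int) y := by
    intro y hy
    have hy' : Reach cells ((r, c)) y :=
      Relation.ReflTransGen.mono (fun a b ⟨h1, h3⟩ => ⟨h1, (hmemB b).mpr h3⟩) hy
    exact (reach_to_connIn hscells hy').2
  have hWc0 : W = c0.toFinset := by
    ext x
    constructor
    · intro hx
      exact List.mem_toFinset.mpr ((hchar x).mpr (hreach_to_conn x (hW3 x hx)))
    · intro hx
      have hcx : ConnIn cells ((r, c) : Int × Int) x := (hchar x).mp (List.mem_toFinset.mp hx)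
      exact rtg_mem_of_closed (V := (· ∈ W)) hW2 (fun a ha b hs => hW4 a ha b hs)
        (hconn_to_reach x hcx)
  have hsize := size_fold ((r, c) : Int × Int) comps 0 c0 hc0 hstart huniq
  rw [hsize]
  have hlen : PySem.Set.len c0 = (c0.length : Int) := by
    simp [PySem.Set.len]
  have hcard : W.card = c0.length := by
    rw [hWc0]; exact List.toFinset_card_of_nodup (hnd c0 hc0)
  rw [hlen, hcard, Finset.card_singleton]
  rw [show ((1 : Nat) : Int) = (1 : Int) from rfl]
  rw [beq_cond c0.length]


-- ----- negative positions: Python's wraparound indexing on the A side -----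
def wrapI (x : Int) : Int := if x < 0 then x + 5 else x
def wrapP (p : Int × Int) : Int × Int := (wrapI p.1, wrapI p.2)
def Bnd (p : Int × Int) : Prop := -5 ≤ p.1 ∧ p.1 < 5 ∧ -5 ≤ p.2 ∧ p.2 < 5

theorem inGrid_wrapP {p : Int × Int} (h : Bnd p) : InGrid (wrapP p) := by
  obtain ⟨h1, h2, h3, h4⟩ := h
  refine ⟨?_, ?_, ?_, ?_⟩ <;> simp only [wrapP, wrapI] <;> split_ifs <;> omega

theorem pyIdx?_wrap (i : Int) (h1 : -5 ≤ i) (h2 : i < 5) :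
    PySem.List.pyIdx? 5 i = PySem.List.pyIdx? 5 (wrapI i) := by
  unfold PySem.List.pyIdx? wrapI
  by_cases h : i < 0
  · rw [if_neg (by omega), if_pos (by push_cast; omega), if_pos h,
        if_pos (by omega), if_pos (by push_cast; omega)]
    congr 1
    omega
  · rw [if_neg h]

theorem pyGet?_wrap {α : Type} (xs : List α) (h5 : xs.length = 5) (i : Int)
    (h1 : -5 ≤ i) (h2 : i < 5) :
    PySem.List.pyGet? xs i = PySem.List.pyGet? xs (wrapI i) := by
  unfold PySem.List.pyGet?
  rw [h5, pyIdx?_wrap i h1 h2]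

theorem pySetD_wrap {α : Type} (xs : List α) (h5 : xs.length = 5) (i : Int)
    (h1 : -5 ≤ i) (h2 : i < 5) (v : α) :
    PySem.List.pySetD xs i v = PySem.List.pySetD xs (wrapI i) v := by
  unfold PySem.List.pySetD PySem.List.pySet?
  rw [h5, pyIdx?_wrap i h1 h2]

theorem pyGet?_mem {α : Type} {xs : List α} {i : Int} {x : α}
    (h : PySem.List.pyGet? xs i = some x) : x ∈ xs := by
  unfold PySem.List.pyGet? at h
  cases hk : PySem.List.pyIdx? xs.length i with
  | none => rw [hk] at h; simp at h
  | some k =>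
    rw [hk] at h
    simp only [Option.bind_some] at h
    exact List.mem_of_getElem? h

theorem mset_wrap {α : Type} {m : List (List α)} (hm : Shape m) {p : Int × Int}
    (hp : Bnd p) (v : α) :
    mset m p.1 p.2 v = mset m (wrapP p).1 (wrapP p).2 v := by
  obtain ⟨hlen, hrows⟩ := hm
  obtain ⟨h1, h2, h3, h4⟩ := hp
  simp only [wrapP]
  unfold mset
  rw [pyGet?_wrap m hlen p.1 h1 h2]
  cases hX : PySem.List.pyGet? m (wrapI p.1) with
  | none => rfl
  | some row =>
    simp only [Option.map_some, Option.getD_some]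
    have hrow5 : row.length = 5 := hrows row (pyGet?_mem hX)
    rw [pySetD_wrap row hrow5 p.2 h3 h4, pySetD_wrap m hlen p.1 h1 h2]

theorem fold_mset_wrap {α : Type} (v : α) : ∀ (l : List (Int × Int)) (b : List (List α)),
    Shape b → (∀ p ∈ l, Bnd p) →
    l.foldl (fun b p => mset b p.1 p.2 v) b
      = (l.map wrapP).foldl (fun b p => mset b p.1 p.2 v) b := by
  intro l
  induction l with
  | nil => intro b _ _; rfl
  | cons p l ih =>
    intro b hb hl
    have hp : Bnd p := hl p (by simp)
    simp only [List.map_cons, List.foldl_cons]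
    rw [← mset_wrap hb hp v]
    exact ih _ (by rw [mset_wrap hb hp v]; exact shape_mset hb (inGrid_wrapP hp) v)
      (fun q hq => hl q (by simp [hq]))

theorem bfsA_le {cells : List (Int × Int)} {board : List (List Int)}
    (hb : BoardOK board (fun p => p ∈ cells)) (hgrid : ∀ p ∈ cells, InGrid p) :
    ∀ (fuel : Nat) (q : List (Int × Int)) (vis : List (List Bool)) (cnt : Int), Shape vis →
      bfsA board fuel q vis cnt ≤ cnt + ((cells.toFinset \ visF vis).card : Int) := by
  intro fuel
  induction fuel with
  | zero =>
    intro q vis cnt _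
    have h0 : bfsA board 0 q vis cnt = cnt := by simp [bfsA]
    rw [h0]
    have := Int.natCast_nonneg ((cells.toFinset \ visF vis).card)
    omega
  | succ fuel ih =>
    intro q vis cnt hsh
    cases q with
    | nil =>
      have h0 : bfsA board (fuel + 1) [] vis cnt = cnt := by simp [bfsA]
      rw [h0]
      have := Int.natCast_nonneg ((cells.toFinset \ visF vis).card)
      omega
    | cons hd rest =>
      obtain ⟨r, c⟩ := hd
      have hunf : bfsA board (fuel + 1) ((r, c) :: rest) vis cnt
          = bfsA board fuel
              ((nbrs (r, c)).foldl (fun (st : List (Int × Int) × List (List Bool) × Int) b =>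
                if is_movable b.1 b.2 && !(mget st.2.1 b.1 b.2 false) && (mget board b.1 b.2 0 == 1)
                then (st.1 ++ [b], mset st.2.1 b.1 b.2 true, st.2.2 + 1) else st) (rest, vis, cnt)).1
              ((nbrs (r, c)).foldl (fun (st : List (Int × Int) × List (List Bool) × Int) b =>
                if is_movable b.1 b.2 && !(mget st.2.1 b.1 b.2 false) && (mget board b.1 b.2 0 == 1)
                then (st.1 ++ [b], mset st.2.1 b.1 b.2 true, st.2.2 + 1) else st) (rest, vis, cnt)).2.1
              ((nbrs (r, c)).foldl (fun (st : List (Int × Int) × List (List Bool) × Int) b =>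
                if is_movable b.1 b.2 && !(mget st.2.1 b.1 b.2 false) && (mget board b.1 b.2 0 == 1)
                then (st.1 ++ [b], mset st.2.1 b.1 b.2 true, st.2.2 + 1) else st) (rest, vis, cnt)).2.2 := by
        rw [bfsA, stepFold_eq]
      rw [hunf]
      obtain ⟨o1, o2, o3, o4⟩ := pushLoop hb hgrid (nbrs (r, c)) (nbrs_nodup _) rest vis cnt hsh
      rw [o4]
      set new := (nbrs (r, c)).filter (fun b => decide (b ∈ cells ∧ b ∉ visF vis)) with hnewdef
      have hnew_nodup : new.Nodup := (nbrs_nodup _).filter _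
      have hsub : new.toFinset ⊆ cells.toFinset \ visF vis := by
        intro x hx
        have h2 := List.of_mem_filter (List.mem_toFinset.mp hx)
        simp only [decide_eq_true_eq] at h2
        exact Finset.mem_sdiff.mpr ⟨List.mem_toFinset.mpr h2.1, h2.2⟩
      rw [o3]
      have hIH := ih (rest ++ new) _ (cnt + (new.length : Int)) o1
      rw [o2] at hIH
      have hdiff : cells.toFinset \ (visF vis ∪ new.toFinset)
          = (cells.toFinset \ visF vis) \ new.toFinset := by
        ext x; simp only [Finset.mem_sdiff, Finset.mem_union]; tauto
      have hint : new.toFinset ∩ (cells.toFinset \ visF vis) = new.toFinset :=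
        Finset.inter_eq_left.mpr hsub
      have hcard : ((cells.toFinset \ visF vis) \ new.toFinset).card
          = (cells.toFinset \ visF vis).card - new.length := by
        rw [Finset.card_sdiff, hint, List.toFinset_card_of_nodup hnew_nodup]
      have hle : new.length ≤ (cells.toFinset \ visF vis).card := by
        rw [← List.toFinset_card_of_nodup hnew_nodup]
        exact Finset.card_le_card hsub
      rw [hdiff, hcard] at hIH
      refine le_trans hIH ?_
      omega

theorem ofList_length_eq (l : List (Int × Int)) :
    (PySem.Set.ofList l).length = l.toFinset.card := by
  have h1 : (PySem.Set.ofList l).toFinset = l.toFinset := by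
    ext x; simp [PySem.Set.mem_ofList]
  rw [← h1, List.toFinset_card_of_nodup (PySem.Set.nodup_ofList l)]

theorem small_A_zero (pos_set : List (Int × Int)) (hne : pos_set ≠ [])
    (hbnd : ∀ p ∈ pos_set, Bnd p)
    (hsmall : (PySem.Set.ofList pos_set).length ≤ 6) : is_linked pos_set = 0 := by
  obtain ⟨s, hlast⟩ : ∃ s, pos_set.getLast? = some s := by
    cases h : pos_set.getLast? with
    | some s => exact ⟨s, rfl⟩
    | none => exact absurd (List.getLast?_eq_none_iff.mp h) hne
  have hsmem : s ∈ pos_set := List.mem_of_getLast? hlast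
  have hsb : Bnd s := hbnd s hsmem
  obtain ⟨r, c⟩ := s
  unfold is_linked
  rw [hlast]
  simp only []
  have hboard : pos_set.foldl (fun b p => mset b p.1 p.2 1)
        (List.replicate 5 (List.replicate 5 (0 : Int)))
      = (pos_set.map wrapP).foldl (fun b p => mset b p.1 p.2 1)
        (List.replicate 5 (List.replicate 5 (0 : Int))) :=
    fold_mset_wrap 1 pos_set _ (shape_replicate 0) hbnd
  have hgridW : ∀ p ∈ pos_set.map wrapP, InGrid p := by
    intro p hp
    obtain ⟨q, hq, rfl⟩ := List.mem_map.mp hp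
    exact inGrid_wrapP (hbnd q hq)
  have hb : BoardOK ((pos_set.map wrapP).foldl (fun b p => mset b p.1 p.2 1)
      (List.replicate 5 (List.replicate 5 (0 : Int)))) (fun p => p ∈ pos_set.map wrapP) :=
    board_built _ hgridW
  rw [hboard]
  have hvw : mset (List.replicate 5 (List.replicate 5 false)) r c true
      = mset (List.replicate 5 (List.replicate 5 false)) (wrapP (r, c)).1 (wrapP (r, c)).2 true :=
    mset_wrap (shape_replicate false) hsb true
  rw [hvw]
  have hsh1 : Shape (mset (List.replicate 5 (List.replicate 5 false))
      (wrapP (r, c)).1 (wrapP (r, c)).2 true) :=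
    shape_mset (shape_replicate false) (inGrid_wrapP hsb) true
  have hv1 : visF (mset (List.replicate 5 (List.replicate 5 false))
        (wrapP (r, c)).1 (wrapP (r, c)).2 true)
      = {wrapP (r, c)} := by
    rw [visF_mset_true (shape_replicate false) (inGrid_wrapP hsb), visF_init]
    rfl
  have hle := bfsA_le hb hgridW 1000 [(r, c)] _ 0 hsh1
  rw [hv1] at hle
  have hmemW : wrapP (r, c) ∈ (pos_set.map wrapP).toFinset :=
    List.mem_toFinset.mpr (List.mem_map.mpr ⟨(r, c), hsmem, rfl⟩)
  have h1 : (({wrapP (r, c)} : Finset (Int × Int)) ∩ (pos_set.map wrapP).toFinset)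
      = {wrapP (r, c)} := by
    rw [Finset.inter_eq_left]
    simpa using hmemW
  have hcard1 : ((pos_set.map wrapP).toFinset \ {wrapP (r, c)}).card
      = (pos_set.map wrapP).toFinset.card - 1 := by
    rw [Finset.card_sdiff, h1, Finset.card_singleton]
  have hsubimg : (pos_set.map wrapP).toFinset ⊆ Finset.image wrapP pos_set.toFinset := by
    intro x hx
    obtain ⟨q, hq, rfl⟩ := List.mem_map.mp (List.mem_toFinset.mp hx)
    exact Finset.mem_image.mpr ⟨q, List.mem_toFinset.mpr hq, rfl⟩
  have hcard2 : (pos_set.map wrapP).toFinset.card ≤ 6 := by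
    calc (pos_set.map wrapP).toFinset.card
        ≤ (Finset.image wrapP pos_set.toFinset).card := Finset.card_le_card hsubimg
      _ ≤ pos_set.toFinset.card := Finset.card_image_le
      _ = (PySem.Set.ofList pos_set).length := (ofList_length_eq pos_set).symm
      _ ≤ 6 := hsmall
  have hne1 : 1 ≤ (pos_set.map wrapP).toFinset.card := Finset.card_pos.mpr ⟨_, hmemW⟩
  have hfinal : bfsA ((pos_set.map wrapP).foldl (fun b p => mset b p.1 p.2 1)
      (List.replicate 5 (List.replicate 5 (0 : Int)))) 1000 [(r, c)]
      (mset (List.replicate 5 (List.replicate 5 false))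
        (wrapP (r, c)).1 (wrapP (r, c)).2 true) 0 ≠ 6 := by
    rw [hcard1] at hle
    omega
  rw [ite_cond_false (beq_eq_false_iff_ne.mpr hfinal)]

theorem size_fold_ne (st : Int × Int) :
    ∀ (l : List (PySem.Set (Int × Int))) (acc : Int),
      (∀ c ∈ l, PySem.Set.len c ≠ 7) → acc ≠ 7 →
      l.foldl (fun sz comp =>
        if PySem.Set.contains comp st then PySem.Set.len comp else sz) acc ≠ 7 := by
  intro l
  induction l with
  | nil => intro acc _ h; exact h
  | cons ch l ih =>
    intro acc hl hacc
    simp only [List.foldl_cons]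
    cases hB : PySem.Set.contains ch st with
    | true =>
      rw [ite_cond_true rfl]
      exact ih (PySem.Set.len ch) (fun d hd => hl d (by simp [hd])) (hl ch (by simp))
    | false =>
      rw [ite_cond_false rfl]
      exact ih acc (fun d hd => hl d (by simp [hd])) hacc

theorem small_B_zero (pos_set : List (Int × Int)) (hbnd : ∀ p ∈ pos_set, Bnd p)
    (hsmall : (PySem.Set.ofList pos_set).length ≤ 6) : is_linked_alt pos_set = 0 := by
  unfold is_linked_alt
  cases hlast : pos_set.getLast? with
  | none => rfl
  | some st =>
    simp only []
    rw [cellsB_eq]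
    have hboard : pos_set.foldl (fun b p => mset b p.1 p.2 true)
          (List.replicate 5 (List.replicate 5 false))
        = (pos_set.map wrapP).foldl (fun b p => mset b p.1 p.2 true)
          (List.replicate 5 (List.replicate 5 false)) :=
      fold_mset_wrap true pos_set _ (shape_replicate false) hbnd
    rw [hboard]
    set board := (pos_set.map wrapP).foldl (fun b p => mset b p.1 p.2 true)
      (List.replicate 5 (List.replicate 5 false)) with hboarddef
    have hgridW : ∀ p ∈ pos_set.map wrapP, InGrid p := by
      intro p hp
      obtain ⟨q, hq, rfl⟩ := List.mem_map.mp hp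
      exact inGrid_wrapP (hbnd q hq)
    have hbB : BoardOKB board (fun p => p ∈ pos_set.map wrapP) := board_builtB _ hgridW
    set cells := gridL.filter (fun p => mget board p.1 p.2 false) with hcellsdef
    have hcellsnd : cells.Nodup := nodup_cellsB board
    have hsubimg : cells.toFinset ⊆ Finset.image wrapP pos_set.toFinset := by
      intro x hx
      have hm := mem_cellsB.mp (List.mem_toFinset.mp hx)
      have := (hbB.2 x hm.1).mp hm.2
      obtain ⟨q, hq, rfl⟩ := List.mem_map.mp this
      exact Finset.mem_image.mpr ⟨q, List.mem_toFinset.mpr hq, rfl⟩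
    have hcells6 : cells.length ≤ 6 := by
      calc cells.length = cells.toFinset.card :=
            (List.toFinset_card_of_nodup hcellsnd).symm
        _ ≤ (Finset.image wrapP pos_set.toFinset).card := Finset.card_le_card hsubimg
        _ ≤ pos_set.toFinset.card := Finset.card_image_le
        _ = (PySem.Set.ofList pos_set).length := (ofList_length_eq pos_set).symm
        _ ≤ 6 := hsmall
    have hInv0 : CompInv ([] : List (Int × Int)) ([] : List (PySem.Set (Int × Int))) := by
      refine ⟨by simp, by simp, by simp, by simp⟩
    have hInv1 := compInv_fold cells [] [] hInv0 (by simp) hcellsnd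
    have hInv : CompInv cells (cells.foldl mergeStep []) := by
      refine compInv_congr ?_ hInv1
      intro z; simp
    obtain ⟨hnd, hcov, _, _⟩ := hInv
    have hcomp6 : ∀ ch ∈ cells.foldl mergeStep [], PySem.Set.len ch ≠ 7 := by
      intro ch hch
      have hsub : ch.toFinset ⊆ cells.toFinset := by
        intro x hx
        exact List.mem_toFinset.mpr ((hcov x).mp ⟨ch, hch, List.mem_toFinset.mp hx⟩)
      have hlen : ch.length ≤ 6 := by
        calc ch.length = ch.toFinset.card := (List.toFinset_card_of_nodup (hnd ch hch)).symm
          _ ≤ cells.toFinset.card := Finset.card_le_card hsub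
          _ = cells.length := List.toFinset_card_of_nodup hcellsnd
          _ ≤ 6 := hcells6
      have h : PySem.Set.len ch = (ch.length : Int) := by simp [PySem.Set.len]
      rw [h]
      omega
    have hne7 := size_fold_ne st (cells.foldl mergeStep []) 0 hcomp6 (by omega)
    rw [ite_cond_false (beq_eq_false_iff_ne.mpr hne7)]

theorem is_linked_agree (pos_set : List (Int × Int)) (hpre : Pre_is_linked pos_set) :
    is_linked pos_set = is_linked_alt pos_set := by
  obtain ⟨hne, hbnd, hcase⟩ := hpre
  rcases hcase with hpos | hsmall
  · refine agree_nonneg pos_set hne ?_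
    intro p hp
    exact ⟨(hpos p hp).1, (hbnd p hp).2.1, (hpos p hp).2, (hbnd p hp).2.2.2⟩
  · rw [small_A_zero pos_set hne (fun p hp => hbnd p hp) hsmall,
        small_B_zero pos_set (fun p hp => hbnd p hp) hsmall]

-- ===== VERDICT (by name: the statement is the Claim_ definition above) =====
theorem is_linked_spec : Claim_equal_is_linked := by
  intro pos_set _ hpre
  unfold Spec_is_linked
  exact is_linked_agree pos_set hpre
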